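-- pv_equiv track=rewrite | github.com/michaelv2/agentmon | agentmon/analyzers/dns_baseline.py | _matches_at_label_boundary
-- ===== SOURCE A (Python) =====
-- def _matches_at_label_boundary(domain: str, pattern: str) -> bool:
--     """Check if pattern appears at domain label boundaries.
--
--     Start boundary: pattern must begin at position 0 or immediately after
--     a dot, preventing partial mid-label matches like 'c2-' inside 'ec2-'.
--
--     End boundary: patterns ending with an alphanumeric character (e.g.,
--     'beacon') also require the match to end at a label boundary (before a
--     dot or at end of string). This prevents 'beacon' from matching
--     'beacons2.gvt2.com'. Patterns ending with a non-alphanumeric character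
--     (e.g., 'c2-') only require start boundary, acting as label prefixes.
--     """
--     d = domain.lower()
--     p = pattern.lower()
--     if not p:
--         return False
--     require_end_boundary = p[-1].isalnum()
--     idx = 0
--     while True:
--         idx = d.find(p, idx)
--         if idx == -1:
--             return False
--         # Start boundary: at position 0 or after a dot
--         if idx == 0 or d[idx - 1] == ".":
--             if not require_end_boundary:
--                 return True
--             # End boundary: at end of string or before a dot
--             end_idx = idx + len(p)
--             if end_idx >= len(d) or d[end_idx] == ".":
--                 return True
--         idx += 1
-- ===== SOURCE B (Python) =====
-- def _matches_at_label_boundary(domain: str, pattern: str) -> bool: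
--     """Collect label-boundary start offsets in one pass, then test the
--     pattern at each candidate offset with startswith."""
--     d = domain.lower()
--     p = pattern.lower()
--     if not p:
--         return False
--     require_end_boundary = p[-1].isalnum()
--     starts = [0] + [i + 1 for i in range(len(d)) if d[i] == "."]
--     for off in starts:
--         if d.startswith(p, off):
--             if not require_end_boundary:
--                 return True
--             end = off + len(p)
--             if end == len(d) or d[end] == ".":
--                 return True
--     return False
-- ===== Notes on version B (the rewrite author's own statement) =====
-- stated objective: alternative
-- what changed: Replaces A's find-and-retry scan over every occurrence of the pattern with a single pass that collects all label-boundary start offsets (0 and each position after a dot) followed by a startswith test at each candidate offset.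
import Mathlib
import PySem

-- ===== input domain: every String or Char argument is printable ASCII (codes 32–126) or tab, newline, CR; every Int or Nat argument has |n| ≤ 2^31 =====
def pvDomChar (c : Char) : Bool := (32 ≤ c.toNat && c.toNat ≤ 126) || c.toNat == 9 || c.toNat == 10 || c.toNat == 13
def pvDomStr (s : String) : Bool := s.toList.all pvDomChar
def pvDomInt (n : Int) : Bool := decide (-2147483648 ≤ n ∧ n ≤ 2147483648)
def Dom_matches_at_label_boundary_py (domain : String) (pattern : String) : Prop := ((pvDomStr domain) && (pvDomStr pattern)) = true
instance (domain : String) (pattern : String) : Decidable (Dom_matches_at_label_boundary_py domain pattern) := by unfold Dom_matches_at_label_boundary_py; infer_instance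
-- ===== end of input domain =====

-- B replaces A's find-and-retry scan over all occurrences by one pass collecting
-- label-boundary offsets followed by a startswith test at each (objective: alternative).

-- ===== PORT A =====
-- A's `while True` loop: idx = d.find(p, idx); check boundaries; idx += 1 and retry.
-- The `if hg : …` branch is a totality guard only (never taken when the loop is
-- entered as A enters it); it does not change the computation.
def pvAloop (d p : List Char) (req : Bool) (idx : Nat) : Bool :=
  let j : Int := PySem.Chars.findFrom d p (idx : Int) none
  if j = -1 then false
  else
    let i := j.toNat
    if hg : i < idx ∨ d.length < i then false
    else
      if i == 0 || PySem.List.pyGetD d ((i : Int) - 1) ' ' == '.' then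
        if !req then true
        else
          if d.length ≤ i + p.length || PySem.List.pyGetD d ((i + p.length : Nat) : Int) ' ' == '.' then
            true
          else pvAloop d p req (i + 1)
      else pvAloop d p req (i + 1)
termination_by d.length + 1 - idx
decreasing_by all_goals { simp only [not_or, not_lt] at hg; omega }

def matches_at_label_boundary_py (domain : String) (pattern : String) : Bool :=
  let d := PySem.Chars.lower domain.toList
  let p := PySem.Chars.lower pattern.toList
  if p.isEmpty then false
  else
    let req := PySem.Chars.isalnum (PySem.List.pyGetD p (-1) ' ')
    pvAloop d p req 0

-- ===== PORT B =====
-- starts = [0] + [i + 1 for i in range(len(d)) if d[i] == "."]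
def pvStarts (d : List Char) : List Nat :=
  0 :: (PySem.List.pyRange 0 (d.length : Int) 1).filterMap
        (fun i => if PySem.List.pyGetD d i ' ' == '.' then some (i.toNat + 1) else none)

def matches_at_label_boundary_py_alt (domain : String) (pattern : String) : Bool :=
  let d := PySem.Chars.lower domain.toList
  let p := PySem.Chars.lower pattern.toList
  if p.isEmpty then false
  else
    let req := PySem.Chars.isalnum (PySem.List.pyGetD p (-1) ' ')
    (pvStarts d).any fun off =>
      PySem.Chars.startswith (d.drop off) p &&
      (!req || off + p.length == d.length ||
        PySem.List.pyGetD d ((off + p.length : Nat) : Int) ' ' == '.')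

-- ===== PRECONDITION & SPEC =====
def Spec_matches_at_label_boundary_py (domain : String) (pattern : String) (out : Bool) : Prop := out = matches_at_label_boundary_py_alt domain pattern
instance (domain : String) (pattern : String) (out : Bool) : Decidable (Spec_matches_at_label_boundary_py domain pattern out) := by unfold Spec_matches_at_label_boundary_py; infer_instance

-- ===== CLAIM (what is proved, stated in full; the proofs are below) =====
def Claim_equal_matches_at_label_boundary_py : Prop := ∀ (domain : String) (pattern : String), Dom_matches_at_label_boundary_py domain pattern → Spec_matches_at_label_boundary_py domain pattern (matches_at_label_boundary_py domain pattern)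

-- ===== LEMMAS AND PROOFS =====


/-- Start-boundary bool of both ports ↔ its propositional form. -/
theorem pvStartB (d : List Char) (i : Nat) :
    ((i == 0 || PySem.List.pyGetD d ((i : Int) - 1) ' ' == '.') = true) ↔
      (i = 0 ∨ d[i - 1]? = some '.') := by
  rcases Nat.eq_zero_or_pos i with h0 | h0
  · subst h0; simp
  · have hcast : (i : Int) - 1 = ((i - 1 : Nat) : Int) := by omega
    rw [hcast, PySem.List.pyGetD_natCast]
    rcases Nat.lt_or_ge (i - 1) d.length with hlt | hge
    · simp [List.getD_eq_getElem?_getD, List.getElem?_eq_getElem hlt, Nat.pos_iff_ne_zero.mp h0]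
    · simp [List.getD_eq_getElem?_getD, List.getElem?_eq_none (by omega : d.length ≤ i - 1),
        Nat.pos_iff_ne_zero.mp h0]

/-- End-boundary bool (A's form) ↔ its propositional form, given the match fits. -/
theorem pvEndB (d : List Char) (e : Nat) :
    ((decide (d.length ≤ e) || PySem.List.pyGetD d ((e : Nat) : Int) ' ' == '.') = true) ↔
      (d.length ≤ e ∨ d[e]? = some '.') := by
  rcases Nat.lt_or_ge e d.length with hlt | hge
  · rw [PySem.List.pyGetD_natCast]
    simp [List.getD_eq_getElem?_getD, List.getElem?_eq_getElem hlt, Nat.not_le.mpr hlt]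
  · simp [hge]

/-- A prefix of `d.drop i` is an infix of `d.drop idx` for `idx ≤ i`. -/
theorem pvInfix_of_prefix_drop {p d : List Char} {idx i : Nat} (hidx : idx ≤ i)
    (h : p <+: d.drop i) : p <:+: d.drop idx := by
  have : d.drop i = (d.drop idx).drop (i - idx) := by
    rw [List.drop_drop]; congr 1; omega
  rw [this] at h
  exact h.isInfix.trans (List.drop_suffix _ _).isInfix

/-- The match fits inside `d` and starts strictly inside it. -/
theorem pvFit {p d : List Char} {i : Nat} (hp : p ≠ []) (h : p <+: d.drop i) :
    i + p.length ≤ d.length ∧ i < d.length := by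
  have h1 : p.length ≤ (d.drop i).length := h.length_le
  have h2 : 0 < p.length := List.length_pos_iff.mpr hp
  rw [List.length_drop] at h1
  omega

/-- End-boundary bool (B's form, with `==`) ↔ the same proposition, given the match fits. -/
theorem pvEndBalt (d : List Char) (e : Nat) (hle : e ≤ d.length) :
    ((e == d.length || PySem.List.pyGetD d ((e : Nat) : Int) ' ' == '.') = true) ↔
      (d.length ≤ e ∨ d[e]? = some '.') := by
  have h1 : (e == d.length) = decide (d.length ≤ e) := by
    by_cases h : e = d.length
    · simp [h]
    · simp [h, Nat.not_le.mpr (lt_of_le_of_ne hle h)]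
  rw [h1]
  exact pvEndB d e

/-- Membership in B's boundary-offset list. -/
theorem mem_pvStarts (d : List Char) (off : Nat) :
    off ∈ pvStarts d ↔ (off = 0 ∨ (0 < off ∧ d[off - 1]? = some '.')) := by
  unfold pvStarts
  simp only [List.mem_cons, List.mem_filterMap]
  constructor
  · rintro (rfl | ⟨k, hk, hif⟩)
    · exact Or.inl rfl
    · rw [PySem.List.mem_pyRange_one] at hk
      split at hif
      · rename_i hc
        obtain rfl : k.toNat + 1 = off := Option.some_inj.mp hif
        have hkn : k = ((k.toNat : Nat) : Int) := by omega
        rw [hkn, PySem.List.pyGetD_natCast] at hc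
        have hlt : k.toNat < d.length := by omega
        refine Or.inr ⟨Nat.succ_pos _, ?_⟩
        simp only [Nat.add_sub_cancel, List.getElem?_eq_getElem hlt]
        have := beq_iff_eq.mp hc
        rw [List.getD_eq_getElem?_getD, List.getElem?_eq_getElem hlt] at this
        simpa using this
      · exact absurd hif (by simp)
  · rintro (rfl | ⟨hpos, hget⟩)
    · exact Or.inl rfl
    · right
      have hlt : off - 1 < d.length := (List.getElem?_eq_some_iff.mp hget).1
      refine ⟨((off - 1 : Nat) : Int), ?_, ?_⟩
      · rw [PySem.List.mem_pyRange_one]; omega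
      · rw [PySem.List.pyGetD_natCast]
        have : d.getD (off - 1) ' ' = '.' := by
          rw [List.getD_eq_getElem?_getD, hget]; rfl
        rw [this]
        simp only [beq_self_eq_true, if_true, Int.toNat_natCast, Option.some.injEq]
        omega

/-- B's per-offset test ↔ match-and-end-boundary, for a nonempty pattern. -/
theorem pvCondIff (d p : List Char) (req : Bool) (hp : p ≠ []) (off : Nat) :
    ((PySem.Chars.startswith (d.drop off) p &&
      (!req || off + p.length == d.length ||
        PySem.List.pyGetD d ((off + p.length : Nat) : Int) ' ' == '.')) = true)
    ↔ (p <+: d.drop off ∧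
        (req = true → (d.length ≤ off + p.length ∨ d[off + p.length]? = some '.'))) := by
  rw [Bool.and_eq_true, PySem.Chars.startswith_iff]
  constructor
  · rintro ⟨hpre, hrest⟩
    refine ⟨hpre, fun hreq => ?_⟩
    have hle := (pvFit hp hpre).1
    rw [hreq] at hrest
    simp only [Bool.not_true, Bool.false_or] at hrest
    exact (pvEndBalt d (off + p.length) hle).mp hrest
  · rintro ⟨hpre, hend⟩
    refine ⟨hpre, ?_⟩
    cases req with
    | false => simp
    | true =>
      have hle := (pvFit hp hpre).1
      simp only [Bool.not_true, Bool.false_or]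
      exact (pvEndBalt d (off + p.length) hle).mpr (hend rfl)

/-- The common characterisation: `p` matches in `d` at start offset `i` with
A's boundary rules. -/
def pvOk (d p : List Char) (req : Bool) (i : Nat) : Prop :=
  p <+: d.drop i ∧ (i = 0 ∨ d[i - 1]? = some '.') ∧
    (req = true → (d.length ≤ i + p.length ∨ d[i + p.length]? = some '.'))

theorem pvAloop_iff_aux (d p : List Char) (req : Bool) (hp : p ≠ []) :
    ∀ n idx, d.length + 1 - idx ≤ n → idx ≤ d.length →
      (pvAloop d p req idx = true ↔ ∃ i, idx ≤ i ∧ pvOk d p req i) := by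
  intro n
  induction n with
  | zero => intro idx hn hle; omega
  | succ n IH =>
    intro idx hn hle
    rw [pvAloop]
    by_cases hj : PySem.Chars.findFrom d p (idx : Int) none = -1
    · rw [if_pos hj]
      rw [PySem.Chars.findFrom_natCast_eq_neg_one_iff d p idx hle] at hj
      constructor
      · intro h; exact absurd h (by simp)
      · rintro ⟨i, hi, hpre, _, _⟩
        exact absurd (pvInfix_of_prefix_drop hi hpre) hj
    · obtain ⟨hge, hpre, hmin⟩ := PySem.Chars.findFrom_natCast_spec d p idx hle hj
      rw [if_neg hj]
      set j := PySem.Chars.findFrom d p (idx : Int) none with hjdef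
      set i := j.toNat with hidef
      have hgei : idx ≤ i := by omega
      obtain ⟨hfit, hilt⟩ := pvFit hp hpre
      have hg : ¬ (i < idx ∨ d.length < i) := by omega
      rw [dif_neg hg]
      have recIff := IH (i + 1) (by omega) (by omega)
      have shift : ¬ pvOk d p req i →
          ((∃ i', i + 1 ≤ i' ∧ pvOk d p req i') ↔ (∃ i', idx ≤ i' ∧ pvOk d p req i')) := by
        intro hnot
        constructor
        · rintro ⟨i', h, ok⟩; exact ⟨i', by omega, ok⟩
        · rintro ⟨i', h, ok⟩
          rcases lt_trichotomy i' i with hlt | rfl | hgt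
          · exact absurd ok.1 (hmin i' h hlt)
          · exact absurd ok hnot
          · exact ⟨i', by omega, ok⟩
      by_cases hs : (i == 0 || PySem.List.pyGetD d ((i : Int) - 1) ' ' == '.') = true
      · rw [if_pos hs]
        have hstart := (pvStartB d i).mp hs
        cases req with
        | false =>
          refine iff_of_true rfl ⟨i, hgei, hpre, hstart, ?_⟩
          intro h; cases h
        | true =>
          simp only [Bool.not_true, Bool.false_eq_true, if_false]
          by_cases he : (decide (d.length ≤ i + p.length) ||
              PySem.List.pyGetD d ((i + p.length : Nat) : Int) ' ' == '.') = true
          · rw [if_pos he]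
            exact iff_of_true rfl ⟨i, hgei, hpre, hstart, fun _ => (pvEndB d (i + p.length)).mp he⟩
          · rw [if_neg he]
            rw [recIff]
            refine shift (fun ok => he ?_)
            exact (pvEndB d (i + p.length)).mpr (ok.2.2 rfl)
      · rw [if_neg hs]
        rw [recIff]
        exact shift (fun ok => hs ((pvStartB d i).mpr ok.2.1))

theorem pvAloop_iff (d p : List Char) (req : Bool) (hp : p ≠ []) :
    ∀ idx, idx ≤ d.length →
      (pvAloop d p req idx = true ↔ ∃ i, idx ≤ i ∧ pvOk d p req i) :=
  fun idx hle => pvAloop_iff_aux d p req hp (d.length + 1 - idx) idx le_rfl hle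

theorem alt_any_iff (d p : List Char) (req : Bool) (hp : p ≠ []) :
    ((pvStarts d).any (fun off =>
      PySem.Chars.startswith (d.drop off) p &&
      (!req || off + p.length == d.length ||
        PySem.List.pyGetD d ((off + p.length : Nat) : Int) ' ' == '.')) = true)
      ↔ ∃ i, pvOk d p req i := by
  rw [List.any_eq_true]
  constructor
  · rintro ⟨off, hmem, hcond⟩
    obtain ⟨hpre, hend⟩ := (pvCondIff d p req hp off).mp hcond
    have hb := (mem_pvStarts d off).mp hmem
    exact ⟨off, hpre, hb.imp id (·.2), hend⟩
  · rintro ⟨i, hpre, hb, hend⟩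
    refine ⟨i, (mem_pvStarts d i).mpr ?_, (pvCondIff d p req hp i).mpr ⟨hpre, hend⟩⟩
    by_cases h0 : i = 0
    · exact Or.inl h0
    · exact hb.imp id (fun h => ⟨Nat.pos_of_ne_zero h0, h⟩)

-- ===== VERDICT (by name: the statement is the Claim_ definition above) =====
theorem matches_at_label_boundary_py_spec : Claim_equal_matches_at_label_boundary_py := by
  intro domain pattern _
  unfold Spec_matches_at_label_boundary_py matches_at_label_boundary_py matches_at_label_boundary_py_alt
  by_cases hp : (PySem.Chars.lower pattern.toList).isEmpty
  · simp [hp]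
  · have e : ∀ b : Bool, (!decide (false = true) && b) = b := by decide
    simp only [hp, Bool.if_false_left, e]
    rw [Bool.eq_iff_iff, pvAloop_iff _ _ _ (by simpa using hp) 0 (Nat.zero_le _),
        alt_any_iff _ _ _ (by simpa using hp)]
    simp
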